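-- pv_equiv track=rewrite | github.com/vanya-koleva/SoftUni-Courses | fundamentals/text_processing/exercise/winning_ticket.py | check_ticket
-- ===== SOURCE A (Python) =====
-- def check_ticket(ticket: str) -> str:
--     if len(ticket) != 20:
--         return "invalid ticket"
--
--     left_side = ticket[:10]
--     right_side = ticket[10:]
--     winning_symbols = ['@', '#', '$','^']
--     for match_symbol in winning_symbols:
--         for uninterrupted_match_length in range(10, 5, - 1):
--             winning_symbol_repetition = match_symbol * uninterrupted_match_length
--             if winning_symbol_repetition in left_side and winning_symbol_repetition in right_side:
--                 if uninterrupted_match_length == 10: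
--                     return f'ticket "{ticket}" - {uninterrupted_match_length}{match_symbol} Jackpot!'
--                 return f'ticket "{ticket}" - {uninterrupted_match_length}{match_symbol}'
--
--     return f'ticket "{ticket}" - no match'
-- ===== SOURCE B (Python) =====
-- def _max_run(side, sym):
--     best = 0
--     cur = 0
--     for ch in side:
--         cur = cur + 1 if ch == sym else 0
--         if cur > best:
--             best = cur
--     return best
--
--
-- def check_ticket(ticket: str) -> str:
--     if len(ticket) != 20:
--         return "invalid ticket"
--
--     left = ticket[:10]
--     right = ticket[10:]
--     for sym in ['@', '#', '$', '^']:
--         best = min(_max_run(left, sym), _max_run(right, sym))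
--         if best >= 6:
--             suffix = " Jackpot!" if best == 10 else ""
--             return f'ticket "{ticket}" - {best}{sym}{suffix}'
--     return f'ticket "{ticket}" - no match'
-- ===== Notes on version B (the rewrite author's own statement) =====
-- stated objective: simpler
-- what changed: Replaces the nested loop over run lengths 10..6 with repeated substring-membership tests by a single run-length scan per half computing the longest contiguous run of each winning symbol, then one min/threshold test per symbol.
import Mathlib
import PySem

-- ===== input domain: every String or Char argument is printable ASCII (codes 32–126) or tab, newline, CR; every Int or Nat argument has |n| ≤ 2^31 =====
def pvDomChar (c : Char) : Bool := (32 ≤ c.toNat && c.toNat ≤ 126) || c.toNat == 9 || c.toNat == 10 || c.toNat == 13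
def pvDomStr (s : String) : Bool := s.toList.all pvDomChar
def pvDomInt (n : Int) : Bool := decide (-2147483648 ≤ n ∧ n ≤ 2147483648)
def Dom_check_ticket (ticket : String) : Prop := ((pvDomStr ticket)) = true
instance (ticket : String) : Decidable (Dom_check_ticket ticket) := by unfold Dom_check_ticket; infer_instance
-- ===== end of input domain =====

-- B replaces A's nested substring-membership loops by one run-length scan per half and a min/threshold test per symbol (simpler, single pass per half).

-- ===== PORT A =====
-- inner loop: 'for uninterrupted_match_length in range(10, 5, -1): …' (returns some result on a hit)
def pvInnerA (ticket : String) (sym : Char) (left right : List Char) : List Int → Option String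
  | [] => none
  | k :: ks =>
      let rep := PySem.List.pyRepeat [sym] k
      if PySem.Chars.isIn rep left && PySem.Chars.isIn rep right then
        if k == 10 then
          some ("ticket \"" ++ ticket ++ "\" - " ++ PySem.Int.toStr k ++ String.ofList [sym] ++ " Jackpot!")
        else
          some ("ticket \"" ++ ticket ++ "\" - " ++ PySem.Int.toStr k ++ String.ofList [sym])
      else pvInnerA ticket sym left right ks

-- outer loop: 'for match_symbol in winning_symbols: …'
def pvOuterA (ticket : String) (left right : List Char) : List Char → String
  | [] => "ticket \"" ++ ticket ++ "\" - no match"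
  | sym :: rest =>
      match pvInnerA ticket sym left right (PySem.List.pyRange 10 5 (-1)) with
      | some r => r
      | none => pvOuterA ticket left right rest

def check_ticket (ticket : String) : String :=
  if PySem.Str.len ticket ≠ 20 then "invalid ticket"
  else
    let t := ticket.toList
    let left := PySem.List.slice t none (some 10)
    let right := PySem.List.slice t (some 10) none
    pvOuterA ticket left right ['@', '#', '$', '^']

-- ===== PORT B =====
-- _max_run(side, sym): running counter reset on a different char, track the best
def pvMaxRunB (side : List Char) (sym : Char) : Nat :=
  (side.foldl
    (fun (st : Nat × Nat) ch =>
      let cur := if ch = sym then st.2 + 1 else 0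
      (max st.1 cur, cur))
    (0, 0)).1

def pvOuterB (ticket : String) (left right : List Char) : List Char → String
  | [] => "ticket \"" ++ ticket ++ "\" - no match"
  | sym :: rest =>
      let best := min (pvMaxRunB left sym) (pvMaxRunB right sym)
      if 6 ≤ best then
        "ticket \"" ++ ticket ++ "\" - " ++ PySem.Int.toStr (best : Int) ++ String.ofList [sym]
          ++ (if best = 10 then " Jackpot!" else "")
      else pvOuterB ticket left right rest

def check_ticket_alt (ticket : String) : String :=
  if PySem.Str.len ticket ≠ 20 then "invalid ticket"
  else
    let t := ticket.toList
    let left := PySem.List.slice t none (some 10)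
    let right := PySem.List.slice t (some 10) none
    pvOuterB ticket left right ['@', '#', '$', '^']

-- ===== PRECONDITION & SPEC =====
def Spec_check_ticket (ticket : String) (out : String) : Prop := out = check_ticket_alt ticket
instance (ticket : String) (out : String) : Decidable (Spec_check_ticket ticket out) := by unfold Spec_check_ticket; infer_instance

-- ===== CLAIM (what is proved, stated in full; the proofs are below) =====
def Claim_equal_check_ticket : Prop := ∀ (ticket : String), Dom_check_ticket ticket → Spec_check_ticket ticket (check_ticket ticket)

-- ===== LEMMAS AND PROOFS =====

-- length of the leading run of sym
def pvLead (sym : Char) : List Char → Nat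
  | [] => 0
  | x :: xs => if x = sym then pvLead sym xs + 1 else 0

-- length of the longest run of sym (specification form)
def pvMaxRun (sym : Char) : List Char → Nat
  | [] => 0
  | x :: xs => max (pvLead sym (x :: xs)) (pvMaxRun sym xs)

theorem pvLead_le_maxRun (sym : Char) (l : List Char) : pvLead sym l ≤ pvMaxRun sym l := by
  cases l with
  | nil => simp [pvLead, pvMaxRun]
  | cons x xs => simp [pvMaxRun]

theorem pvMaxRun_le_length (sym : Char) (l : List Char) : pvMaxRun sym l ≤ l.length := by
  induction l with
  | nil => simp [pvMaxRun]
  | cons x xs ih =>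
      have h : pvLead sym (x :: xs) ≤ (x :: xs).length := by
        clear ih
        induction xs generalizing x with
        | nil => by_cases h : x = sym ; simp [pvLead, h] ; simp [pvLead, h]
        | cons y ys ih =>
            by_cases h : x = sym <;> simp [pvLead, h]
            have := ih y
            by_cases hy : y = sym <;> simp [pvLead, hy] at this ⊢ <;> omega
      simp only [pvMaxRun]
      simp only [List.length_cons] at *
      omega

theorem pvPrefix_replicate (sym : Char) (k : Nat) (t : List Char) :
    List.replicate k sym <+: t ↔ k ≤ pvLead sym t := by
  induction k generalizing t with
  | zero => simp
  | succ n ih =>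
      cases t with
      | nil => simp [pvLead, List.replicate_succ]
      | cons x xs =>
          simp only [List.replicate_succ, List.cons_prefix_cons, pvLead]
          constructor
          · rintro ⟨rfl, h⟩
            simp [(ih xs).mp h]
          · intro h
            by_cases hx : x = sym
            · rw [if_pos hx] at h
              exact ⟨hx.symm, (ih xs).mpr (by omega)⟩
            · rw [if_neg hx] at h
              omega

theorem pvInfix_replicate (sym : Char) (k : Nat) (l : List Char) :
    List.replicate k sym <:+: l ↔ k ≤ pvMaxRun sym l := by
  induction l with
  | nil =>
      cases k with
      | zero => simp [pvMaxRun]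
      | succ n => simp [pvMaxRun, List.replicate_succ]
  | cons x xs ih =>
      rw [List.infix_cons_iff]
      simp only [pvMaxRun]
      rw [pvPrefix_replicate, ih]
      omega

theorem pvFold_maxRun_aux (sym : Char) (l : List Char) (cur best : Nat) :
    (l.foldl
      (fun (st : Nat × Nat) ch =>
        let c := if ch = sym then st.2 + 1 else 0
        (max st.1 c, c))
      (best, cur)).1
    = max best (max (if pvLead sym l = 0 then 0 else cur + pvLead sym l) (pvMaxRun sym l)) := by
  induction l generalizing cur best with
  | nil => simp [pvLead, pvMaxRun]
  | cons x xs ih =>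
      simp only [List.foldl_cons]
      by_cases hx : x = sym
      · simp only [hx, ih]
        have h1 := pvLead_le_maxRun sym xs
        simp only [pvLead, pvMaxRun]
        by_cases h : pvLead sym xs = 0 <;> simp [h] <;> omega
      · simp only [if_neg hx, ih]
        have h1 := pvLead_le_maxRun sym xs
        simp only [pvLead, pvMaxRun, if_neg hx]
        by_cases h : pvLead sym xs = 0 <;> simp [h] <;> omega

theorem pvMaxRunB_eq (side : List Char) (sym : Char) :
    pvMaxRunB side sym = pvMaxRun sym side := by
  unfold pvMaxRunB
  rw [pvFold_maxRun_aux]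
  have := pvLead_le_maxRun sym side
  by_cases h : pvLead sym side = 0 <;> simp [h] <;> omega

theorem pvIsIn_rep (sym : Char) (k : Nat) (l : List Char) :
    PySem.Chars.isIn (List.replicate k sym) l = decide (k ≤ pvMaxRun sym l) := by
  by_cases h : k ≤ pvMaxRun sym l
  · simp [h, PySem.Chars.isIn_iff_infix, pvInfix_replicate]
  · simp only [h, decide_false]
    rw [PySem.Chars.isIn_eq_false_iff, pvInfix_replicate]
    omega

theorem pvInnerA_eq (ticket : String) (sym : Char) (left right : List Char)
    (hl : pvMaxRun sym left ≤ 10) (hr : pvMaxRun sym right ≤ 10) :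
    pvInnerA ticket sym left right (PySem.List.pyRange 10 5 (-1)) =
      (if 6 ≤ min (pvMaxRun sym left) (pvMaxRun sym right) then
        some ("ticket \"" ++ ticket ++ "\" - "
          ++ PySem.Int.toStr ((min (pvMaxRun sym left) (pvMaxRun sym right) : Nat) : Int)
          ++ String.ofList [sym]
          ++ (if min (pvMaxRun sym left) (pvMaxRun sym right) = 10 then " Jackpot!" else ""))
      else none) := by
  have hrange : PySem.List.pyRange 10 5 (-1) = [10, 9, 8, 7, 6] := by decide
  rw [hrange]
  set m := min (pvMaxRun sym left) (pvMaxRun sym right) with hm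
  have hm10 : m ≤ 10 := by omega
  simp only [pvInnerA, PySem.List.pyRepeat_singleton]
  have step : ∀ k : Nat,
      (PySem.Chars.isIn (List.replicate k sym) left && PySem.Chars.isIn (List.replicate k sym) right)
        = decide (k ≤ m) := by
    intro k
    rw [pvIsIn_rep, pvIsIn_rep]
    by_cases h : k ≤ m
    · have : k ≤ pvMaxRun sym left := by omega
      have : k ≤ pvMaxRun sym right := by omega
      simp_all
    · have : ¬ (k ≤ pvMaxRun sym left ∧ k ≤ pvMaxRun sym right) := by omega
      rcases Decidable.not_and_iff_not_or_not.mp this with h' | h' <;> simp [h', h]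
  have n10 : ((10 : Int).toNat) = 10 := by decide
  have n9 : ((9 : Int).toNat) = 9 := by decide
  have n8 : ((8 : Int).toNat) = 8 := by decide
  have n7 : ((7 : Int).toNat) = 7 := by decide
  have n6 : ((6 : Int).toNat) = 6 := by decide
  rw [n10, n9, n8, n7, n6, step 10, step 9, step 8, step 7, step 6]
  interval_cases m <;> simp [String.append_empty]

theorem pvOuter_eq (ticket : String) (left right : List Char)
    (hl : left.length ≤ 10) (hr : right.length ≤ 10) (syms : List Char) :
    pvOuterA ticket left right syms = pvOuterB ticket left right syms := by
  induction syms with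
  | nil => rfl
  | cons sym rest ih =>
      have hml := le_trans (pvMaxRun_le_length sym left) hl
      have hmr := le_trans (pvMaxRun_le_length sym right) hr
      simp only [pvOuterA, pvOuterB, pvInnerA_eq ticket sym left right hml hmr,
        pvMaxRunB_eq]
      by_cases h : 6 ≤ min (pvMaxRun sym left) (pvMaxRun sym right)
      · simp [h]
      · simp [h, ih]

-- ===== VERDICT (by name: the statement is the Claim_ definition above) =====
theorem check_ticket_spec : Claim_equal_check_ticket := by
  intro ticket _
  unfold Spec_check_ticket check_ticket check_ticket_alt
  by_cases h : PySem.Str.len ticket ≠ 20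
  · rw [if_pos h, if_pos h]
  · rw [if_neg h, if_neg h]
    have hlen : ticket.toList.length = 20 := by
      have := PySem.Str.len_eq ticket
      omega
    apply pvOuter_eq
    · rw [PySem.List.slice_to ticket.toList (by omega : (0:Int) ≤ 10)]
      simp
    · rw [PySem.List.slice_from ticket.toList (by omega : (0:Int) ≤ 10)]
      simp [hlen]
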